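-- pv_equiv track=rewrite | github.com/guomics-lab/DDA-BERT | software/src/services/pred_rt_v4_3.py | convert_seq_frag
-- ===== SOURCE A (Python) =====
-- def find_special_characters_positions(sequence, characters):
--     positions = {char: [] for char in characters}
--
--     for index, char in enumerate(sequence):
--         if char in characters:
--             positions[char].append(index)
--
--     return positions
--
-- def only_convert_seq_frag(seq):
--     seq_new = (str(seq).replace('_decoy', '').replace('cC', '-').replace('oxM', '=').
--                replace('deamQ', '+').
--                replace('a<^', '*').
--                replace('deamN', '.'))
--     return seq_new
--
-- def convert_seq_frag(seq):
--     seq_new = only_convert_seq_frag(seq)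
--     characters = ['-', '=', '+', '*', '.']
--     mods = []
--     mod_sites = []
--     positions = find_special_characters_positions(seq_new, characters)
--     pos_list1 = positions.get('-')
--     pos_list2 = positions.get('=')
--     pos_list3 = positions.get('+')
--     pos_list4 = positions.get('*')
--     pos_list5 = positions.get('.')
--
--     mods.extend(['Carbamidomethyl@C'] * len(pos_list1))
--     mods.extend(['Oxidation@M'] * len(pos_list2))
--     mods.extend(['Deamidated@Q'] * len(pos_list3))
--     mods.extend(['Acetyl@Any_N-term'] * len(pos_list4))
--     mods.extend(['Deamidated@N'] * len(pos_list5))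
--
--     mod_sites.extend([str(nn) for nn in pos_list1])
--     mod_sites.extend([str(nn) for nn in pos_list2])
--
--     seq_fin = seq_new.replace('-', 'C').replace('=', 'M').replace('+', 'Q').replace('*', '').replace('.', 'N')
--     mods_str = ';'.join(mods)
--     mod_sites_str = ';'.join(mod_sites)
--     return seq_fin, mods_str, mod_sites_str, len(seq_fin)
-- ===== SOURCE B (Python) =====
-- def convert_seq_frag(seq):
--     seq_new = (str(seq).replace('_decoy', '').replace('cC', '-').replace('oxM', '=')
--                .replace('deamQ', '+').replace('a<^', '*').replace('deamN', '.'))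
--     table = [('-', 'Carbamidomethyl@C'), ('=', 'Oxidation@M'), ('+', 'Deamidated@Q'),
--              ('*', 'Acetyl@Any_N-term'), ('.', 'Deamidated@N')]
--     mods = []
--     for ch, label in table:
--         mods += [label for c in seq_new if c == ch]
--     mod_sites = [str(i) for i, c in enumerate(seq_new) if c == '-']
--     mod_sites += [str(i) for i, c in enumerate(seq_new) if c == '=']
--     seq_fin = seq_new.replace('-', 'C').replace('=', 'M').replace('+', 'Q').replace('*', '').replace('.', 'N')
--     return seq_fin, ';'.join(mods), ';'.join(mod_sites), len(seq_fin)
-- ===== Notes on version B (the rewrite author's own statement) =====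
-- stated objective: simpler
-- what changed: B drops A's dict-of-position-lists helper entirely: mods come from a table-driven loop of per-character filters over seq_new and mod_sites from two filtered enumerate passes, with the same replacement pipeline.
import Mathlib
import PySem

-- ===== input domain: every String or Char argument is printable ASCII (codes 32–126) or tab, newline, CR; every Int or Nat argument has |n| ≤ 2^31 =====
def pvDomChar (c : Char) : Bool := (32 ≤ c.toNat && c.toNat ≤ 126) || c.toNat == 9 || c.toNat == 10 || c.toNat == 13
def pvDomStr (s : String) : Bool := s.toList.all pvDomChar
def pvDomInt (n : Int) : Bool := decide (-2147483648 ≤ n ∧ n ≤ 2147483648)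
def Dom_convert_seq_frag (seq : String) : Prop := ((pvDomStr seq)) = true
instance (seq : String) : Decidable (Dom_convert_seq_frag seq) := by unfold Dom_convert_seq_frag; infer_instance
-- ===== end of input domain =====

-- B replaces A's dict-of-position-lists with a table-driven count pass and two filtered enumerate passes (simpler decomposition).

-- ===== PORT A =====
def find_special_characters_positions (sequence : List Char) (characters : List Char) :
    PySem.Dict Char (List Int) :=
  let positions := characters.foldl (fun d c => d.insert c ([] : List Int)) PySem.Dict.empty
  (PySem.List.enumerate sequence 0).foldl
    (fun d p => if characters.contains p.2 then d.modify p.2 [] (fun l => l ++ [p.1]) else d)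
    positions

def convert_seq_frag (seq : String) : String × String × String × Int :=
  let seq_new := PySem.Str.replace (PySem.Str.replace (PySem.Str.replace (PySem.Str.replace
    (PySem.Str.replace (PySem.Str.replace seq "_decoy" "") "cC" "-") "oxM" "=") "deamQ" "+") "a<^" "*") "deamN" "."
  let characters : List Char := ['-', '=', '+', '*', '.']
  let positions := find_special_characters_positions seq_new.toList characters
  -- .get(c) never returns None here (every queried key is seeded in the dict), so the .getD [] default is never used
  let pos_list1 := (positions.get? '-').getD []
  let pos_list2 := (positions.get? '=').getD []
  let pos_list3 := (positions.get? '+').getD []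
  let pos_list4 := (positions.get? '*').getD []
  let pos_list5 := (positions.get? '.').getD []
  let mods := List.replicate pos_list1.length "Carbamidomethyl@C"
    ++ List.replicate pos_list2.length "Oxidation@M"
    ++ List.replicate pos_list3.length "Deamidated@Q"
    ++ List.replicate pos_list4.length "Acetyl@Any_N-term"
    ++ List.replicate pos_list5.length "Deamidated@N"
  let mod_sites := pos_list1.map PySem.Int.toStr ++ pos_list2.map PySem.Int.toStr
  let seq_fin := PySem.Str.replace (PySem.Str.replace (PySem.Str.replace (PySem.Str.replace
    (PySem.Str.replace seq_new "-" "C") "=" "M") "+" "Q") "*" "") "." "N"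
  (seq_fin, PySem.Str.join ";" mods, PySem.Str.join ";" mod_sites, PySem.Str.len seq_fin)

-- ===== PORT B =====
def convert_seq_frag_alt (seq : String) : String × String × String × Int :=
  let seq_new := PySem.Str.replace (PySem.Str.replace (PySem.Str.replace (PySem.Str.replace
    (PySem.Str.replace (PySem.Str.replace seq "_decoy" "") "cC" "-") "oxM" "=") "deamQ" "+") "a<^" "*") "deamN" "."
  let table : List (Char × String) :=
    [('-', "Carbamidomethyl@C"), ('=', "Oxidation@M"), ('+', "Deamidated@Q"),
     ('*', "Acetyl@Any_N-term"), ('.', "Deamidated@N")]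
  let mods := table.foldl
    (fun acc p => acc ++ (seq_new.toList.filter (fun c => c == p.1)).map (fun _ => p.2)) []
  let mod_sites :=
    ((PySem.List.enumerate seq_new.toList 0).filter (fun p => p.2 == '-')).map (fun p => PySem.Int.toStr p.1)
    ++ ((PySem.List.enumerate seq_new.toList 0).filter (fun p => p.2 == '=')).map (fun p => PySem.Int.toStr p.1)
  let seq_fin := PySem.Str.replace (PySem.Str.replace (PySem.Str.replace (PySem.Str.replace
    (PySem.Str.replace seq_new "-" "C") "=" "M") "+" "Q") "*" "") "." "N"
  (seq_fin, PySem.Str.join ";" mods, PySem.Str.join ";" mod_sites, PySem.Str.len seq_fin)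

-- ===== PRECONDITION & SPEC =====
def Spec_convert_seq_frag (seq : String) (out : String × String × String × Int) : Prop := out = convert_seq_frag_alt seq
instance (seq : String) (out : String × String × String × Int) : Decidable (Spec_convert_seq_frag seq out) := by unfold Spec_convert_seq_frag; infer_instance

-- ===== CLAIM (what is proved, stated in full; the proofs are below) =====
def Claim_equal_convert_seq_frag : Prop := ∀ (seq : String), Dom_convert_seq_frag seq → Spec_convert_seq_frag seq (convert_seq_frag seq)

-- ===== LEMMAS AND PROOFS =====

-- A's position-collecting fold, read off through getD: seeded list plus the filtered indices.
theorem posfold_getD (ps : List (Int × Char)) (chars : List Char) (c : Char)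
    (hc : chars.contains c = true) (d : PySem.Dict Char (List Int)) :
    ((ps.foldl
        (fun d p => if chars.contains p.2 then d.modify p.2 [] (fun l => l ++ [p.1]) else d)
        d).getD c [])
      = d.getD c [] ++ (ps.filter (fun p => p.2 == c)).map (·.1) := by
  induction ps generalizing d with
  | nil => simp
  | cons p ps ih =>
    obtain ⟨i, ch⟩ := p
    by_cases hch : ch = c
    · subst hch
      simp only [List.foldl_cons, hc, if_true, List.filter_cons]
      rw [ih _]
      simp
    · have hne : (ch == c) = false := by simp [hch]
      simp only [List.foldl_cons, List.filter_cons, hne, Bool.false_eq_true, if_false]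
      by_cases hcc : chars.contains ch = true
      · rw [if_pos hcc, ih _, PySem.Dict.getD_modify]
        simp [Ne.symm hch]
      · rw [if_neg hcc, ih _]

-- filtering enumerate on the character equals filtering the string itself, length-wise
theorem length_filter_enumerate (s : List Char) (c : Char) (k : Int) :
    ((PySem.List.enumerate s k).filter (fun p => p.2 == c)).length
      = (s.filter (fun x => x == c)).length := by
  induction s generalizing k with
  | nil => simp [PySem.List.enumerate_nil]
  | cons x xs ih =>
    rw [PySem.List.enumerate_cons]
    by_cases hx : x = c <;> simp [hx, ih]

theorem pos_eq (s : List Char) (c : Char) (hc : c ∈ (['-', '=', '+', '*', '.'] : List Char)) :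
    ((find_special_characters_positions s ['-', '=', '+', '*', '.']).get? c).getD []
      = ((PySem.List.enumerate s 0).filter (fun p => p.2 == c)).map (·.1) := by
  have hc' : (['-', '=', '+', '*', '.'] : List Char).contains c = true := by
    simpa using hc
  unfold find_special_characters_positions
  rw [← PySem.Dict.getD_eq_get?_getD, posfold_getD _ _ _ hc']
  have hseed : ((['-', '=', '+', '*', '.'] : List Char).foldl
      (fun d c => d.insert c ([] : List Int)) PySem.Dict.empty).getD c [] = [] := by
    fin_cases hc <;> rfl
  rw [hseed, List.nil_append]

theorem convert_seq_frag_eq (seq : String) : convert_seq_frag seq = convert_seq_frag_alt seq := by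
  simp only [convert_seq_frag, convert_seq_frag_alt]
  rw [pos_eq _ '-' (by decide), pos_eq _ '=' (by decide), pos_eq _ '+' (by decide),
      pos_eq _ '*' (by decide), pos_eq _ '.' (by decide)]
  simp only [List.foldl_cons, List.foldl_nil, List.nil_append, Prod.mk.injEq]
  refine ⟨trivial, ?_, ?_, trivial⟩
  · refine congrArg (PySem.Str.join ";") ?_
    have hmods : ∀ (c : Char) (lbl : String) (t : List Char),
        List.replicate (((PySem.List.enumerate t 0).filter (fun p => p.2 == c)).map (·.1)).length lbl
          = (t.filter (fun x => x == c)).map (fun _ => lbl) := by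
      intro c lbl t
      rw [List.map_const', List.length_map, length_filter_enumerate]
    rw [hmods, hmods, hmods, hmods, hmods]
  · refine congrArg (PySem.Str.join ";") ?_
    simp only [List.map_map]
    rfl

-- ===== VERDICT (by name: the statement is the Claim_ definition above) =====
theorem convert_seq_frag_spec : Claim_equal_convert_seq_frag := by
  intro seq _
  unfold Spec_convert_seq_frag
  exact convert_seq_frag_eq seq
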